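-- pv_equiv track=rewrite | github.com/anfipatica/advent_of_code_2025 | 01/1/main.py | rotate_dial
-- ===== SOURCE A (Python) =====
-- def	rotate_dial(rotations: int, dial: int, dir: int) -> int:
--
-- 	while rotations > 0:
-- 		dial += dir
-- 		if (dial < 0):
-- 			dial = 99
-- 		if (dial > 99):
-- 			dial = 0
-- 		rotations -= 1
-- 	return dial
-- ===== SOURCE B (Python) =====
-- def rotate_dial(rotations: int, dial: int, dir: int) -> int:
-- 	# Closed form: one clamp-step normalizes dial into [0,99]; afterwards the orbit
-- 	# climbs (or falls) to the wrap point and then cycles, so the rest is arithmetic.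
-- 	if rotations <= 0:
-- 		return dial
-- 	d = dial + dir
-- 	if d < 0:
-- 		d = 99
-- 	if d > 99:
-- 		d = 0
-- 	n = rotations - 1
-- 	if n == 0 or dir == 0:
-- 		return d
-- 	if dir >= 100:
-- 		return 0
-- 	if dir <= -100:
-- 		return 99
-- 	if dir > 0:
-- 		t = (99 - d) // dir
-- 		if n <= t:
-- 			return d + n * dir
-- 		r = n - t - 1
-- 		L = 99 // dir + 1
-- 		return (r % L) * dir
-- 	s = -dir
-- 	t = d // s
-- 	if n <= t:
-- 		return d - n * s
-- 	r = n - t - 1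
-- 	L = 99 // s + 1
-- 	return 99 - (r % L) * s
-- ===== Notes on version B (the rewrite author's own statement) =====
-- stated objective: faster
-- what changed: Replaces the O(rotations) one-step-at-a-time simulation by a single clamp step followed by exact closed-form floor-div/mod arithmetic on the eventually-periodic orbit (linear climb to the wrap point, then a cycle), covering every integer dir, not just ±1.
import Mathlib
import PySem

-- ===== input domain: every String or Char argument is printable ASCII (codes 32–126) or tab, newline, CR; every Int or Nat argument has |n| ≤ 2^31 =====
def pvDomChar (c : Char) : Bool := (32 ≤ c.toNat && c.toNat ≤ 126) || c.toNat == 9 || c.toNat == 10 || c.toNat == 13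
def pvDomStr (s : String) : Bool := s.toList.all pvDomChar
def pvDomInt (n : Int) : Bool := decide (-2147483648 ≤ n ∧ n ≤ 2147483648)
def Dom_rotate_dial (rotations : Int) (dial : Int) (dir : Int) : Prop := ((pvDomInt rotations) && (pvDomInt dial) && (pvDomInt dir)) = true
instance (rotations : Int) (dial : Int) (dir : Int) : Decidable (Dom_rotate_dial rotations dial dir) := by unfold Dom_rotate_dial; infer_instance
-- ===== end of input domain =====

-- B replaces A's O(rotations) step-by-step loop by one clamp-step plus exact closed-form
-- arithmetic on the eventually-periodic orbit (objective: faster, asymptotic).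

-- ===== PORT A =====
-- the while-loop of A, recursing on the (nonnegative part of the) counter
def rotateGoA (rotations : Int) (dial : Int) (dir : Int) : Int :=
  if _h : rotations > 0 then
    let dial := dial + dir
    let dial := if dial < 0 then 99 else dial
    let dial := if dial > 99 then 0 else dial
    rotateGoA (rotations - 1) dial dir
  else dial
termination_by rotations.toNat
decreasing_by omega

def rotate_dial (rotations : Int) (dial : Int) (dir : Int) : Int :=
  rotateGoA rotations dial dir

-- ===== PORT B =====
def rotate_dial_alt (rotations : Int) (dial : Int) (dir : Int) : Int :=
  if rotations ≤ 0 then dial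
  else
    let d0 := dial + dir
    let d1 := if d0 < 0 then 99 else d0
    let d := if d1 > 99 then 0 else d1
    let n := rotations - 1
    if n = 0 ∨ dir = 0 then d
    else if dir ≥ 100 then 0
    else if dir ≤ -100 then 99
    else if dir > 0 then
      let t := PySem.Int.floordiv (99 - d) dir
      if n ≤ t then d + n * dir
      else
        let r := n - t - 1
        let L := PySem.Int.floordiv 99 dir + 1
        (PySem.Int.mod r L) * dir
    else
      let s := -dir
      let t := PySem.Int.floordiv d s
      if n ≤ t then d - n * s
      else
        let r := n - t - 1
        let L := PySem.Int.floordiv 99 s + 1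
        99 - (PySem.Int.mod r L) * s

-- ===== PRECONDITION & SPEC =====
def Spec_rotate_dial (rotations : Int) (dial : Int) (dir : Int) (out : Int) : Prop := out = rotate_dial_alt rotations dial dir
instance (rotations : Int) (dial : Int) (dir : Int) (out : Int) : Decidable (Spec_rotate_dial rotations dial dir out) := by unfold Spec_rotate_dial; infer_instance

-- ===== CLAIM (what is proved, stated in full; the proofs are below) =====
def Claim_equal_rotate_dial : Prop := ∀ (rotations : Int) (dial : Int) (dir : Int), Dom_rotate_dial rotations dial dir → Spec_rotate_dial rotations dial dir (rotate_dial rotations dial dir)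

-- ===== LEMMAS AND PROOFS =====

-- one iteration of A's loop body
def pvStep (dir d : Int) : Int :=
  let d0 := d + dir
  let d1 := if d0 < 0 then 99 else d0
  if d1 > 99 then 0 else d1

lemma pvStep_range (dir d : Int) : 0 ≤ pvStep dir d ∧ pvStep dir d ≤ 99 := by
  unfold pvStep; dsimp only; split_ifs <;> omega

lemma rotateGoA_nonpos (rotations dial dir : Int) (h : rotations ≤ 0) :
    rotateGoA rotations dial dir = dial := by
  unfold rotateGoA; simp [show ¬ rotations > 0 by omega]

lemma rotateGoA_eq_iter (n : Nat) (dial dir : Int) :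
    rotateGoA (n : Int) dial dir = (pvStep dir)^[n] dial := by
  induction n generalizing dial with
  | zero => simp [rotateGoA_nonpos]
  | succ k ih =>
      rw [Function.iterate_succ_apply]
      unfold rotateGoA
      simp only [show ((k + 1 : Nat) : Int) > 0 by push_cast; omega, dif_pos]
      have : ((k + 1 : Nat) : Int) - 1 = (k : Int) := by push_cast; ring
      rw [this]
      exact ih (pvStep dir dial)

lemma iter_linear (dir : Int) (hdir : 0 < dir) :
    ∀ (k : Nat) (d : Int), 0 ≤ d → d + k * dir ≤ 99 → (pvStep dir)^[k] d = d + k * dir := by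
  intro k
  induction k with
  | zero => intro d _ _; simp
  | succ m ih =>
      intro d hd hle
      rw [Function.iterate_succ_apply]
      have hs : pvStep dir d = d + dir := by
        unfold pvStep; dsimp only
        have hm : 0 ≤ (m : Int) * dir := by positivity
        have h1 : ¬ d + dir < 0 := by omega
        have h2 : ¬ d + dir > 99 := by push_cast at hle; nlinarith
        simp [h1, h2]
      rw [hs, ih (d + dir) (by omega) (by push_cast at hle ⊢; nlinarith)]
      push_cast; ring

-- after climbing past 99, the dial lands on 0
lemma iter_hits_zero (dir : Int) (hdir : 0 < dir) (hdir99 : dir ≤ 99)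
    (d : Int) (hd0 : 0 ≤ d) (hd99 : d ≤ 99) :
    (pvStep dir)^[((99 - d) / dir).toNat + 1] d = 0 := by
  set t : Int := (99 - d) / dir with ht
  have hmod := Int.emod_nonneg (99 - d) (by omega : dir ≠ 0)
  have hmodlt := Int.emod_lt_of_pos (99 - d) hdir
  have hde := Int.mul_ediv_add_emod (99 - d) dir
  have ht0 : 0 ≤ t := Int.ediv_nonneg (by omega) (by omega)
  have htn : (t.toNat : Int) = t := Int.toNat_of_nonneg ht0
  rw [Function.iterate_succ_apply']
  rw [iter_linear dir hdir t.toNat d hd0 (by rw [htn]; nlinarith [hde])]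
  unfold pvStep; dsimp only
  rw [htn]
  have hgt : d + t * dir + dir > 99 := by nlinarith [hde]
  have hge : ¬ d + t * dir + dir < 0 := by nlinarith [hde]
  simp [hge, hgt]

lemma iter_cycle (dir : Int) (hdir : 0 < dir) (hdir99 : dir ≤ 99) :
    ∀ (r : Nat), (pvStep dir)^[r] 0 = ((r : Int) % ((99 : Int) / dir + 1)) * dir := by
  intro r
  induction r using Nat.strong_induction_on with
  | _ r ih =>
      set L : Int := (99 : Int) / dir + 1 with hL
      have hLnat : L = (((99 : Int) / dir).toNat + 1 : Nat) := by
        have : (0:Int) ≤ 99 / dir := Int.ediv_nonneg (by omega) (by omega)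
        push_cast; omega
      have hmod99 := Int.emod_nonneg (99 : Int) (by omega : dir ≠ 0)
      have hmodlt99 := Int.emod_lt_of_pos (99 : Int) hdir
      have hde99 := Int.mul_ediv_add_emod (99 : Int) dir
      have hL0 : 0 < L := by
        have : (0:Int) ≤ 99 / dir := Int.ediv_nonneg (by omega) (by omega)
        omega
      by_cases hcase : (r : Int) < L
      · have hle : (r : Int) * dir ≤ 99 := by nlinarith
        rw [iter_linear dir hdir r 0 (by omega) (by omega)]
        rw [Int.emod_eq_of_lt (by positivity) hcase]
        ring
      · -- r ≥ L : peel one full cycle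
        have hrL : L.toNat ≤ r := by omega
        have hcyc : (pvStep dir)^[L.toNat] 0 = 0 := by
          have h0 := iter_hits_zero dir hdir hdir99 0 (by omega) (by omega)
          have he : ((99:Int) - 0) / dir = 99 / dir := by norm_num
          rw [he] at h0
          have hq : (0:Int) ≤ 99 / dir := Int.ediv_nonneg (by omega) (by omega)
          have hLt : L.toNat = ((99:Int) / dir).toNat + 1 := by omega
          rw [hLt]
          exact h0
        have hsw : (pvStep dir)^[r] 0
            = (pvStep dir)^[r - L.toNat] ((pvStep dir)^[L.toNat] 0) := by
          rw [← Function.iterate_add_apply]; congr 1; omega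
        rw [hsw, hcyc, ih (r - L.toNat) (by omega)]
        have hc : ((r - L.toNat : Nat) : Int) = (r : Int) - L := by omega
        rw [hc, Int.sub_emod_right]

-- conjugation: a negative-direction dial is a positive-direction dial read backwards
lemma pvStep_conj (dir : Int) (hdir : dir < 0) (d : Int) (hd0 : 0 ≤ d) (hd99 : d ≤ 99) :
    pvStep dir d = 99 - pvStep (-dir) (99 - d) := by
  unfold pvStep; dsimp only
  have h1 : ¬ d + dir > 99 := by omega
  have h2 : ¬ 99 - d + -dir < 0 := by omega
  by_cases hneg : d + dir < 0
  · have : 99 - d + -dir > 99 := by omega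
    simp [hneg, h2, this]
  · have : ¬ 99 - d + -dir > 99 := by omega
    simp [hneg, h2, this]; omega

lemma iter_conj (dir : Int) (hdir : dir < 0) :
    ∀ (n : Nat) (d : Int), 0 ≤ d → d ≤ 99 →
      (pvStep dir)^[n] d = 99 - (pvStep (-dir))^[n] (99 - d) := by
  intro n
  induction n with
  | zero => intro d _ _; simp
  | succ m ih =>
      intro d hd0 hd99
      rw [Function.iterate_succ_apply, Function.iterate_succ_apply]
      rw [pvStep_conj dir hdir d hd0 hd99]
      have hr := pvStep_range (-dir) (99 - d)
      rw [ih (99 - pvStep (-dir) (99 - d)) (by omega) (by omega)]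
      have harg : (99:Int) - (99 - pvStep (-dir) (99 - d)) = pvStep (-dir) (99 - d) := by ring
      rw [harg]

lemma iter_big_pos (dir : Int) (hdir : 100 ≤ dir) :
    ∀ (n : Nat) (d : Int), 0 ≤ d → d ≤ 99 → 1 ≤ n → (pvStep dir)^[n] d = 0 := by
  intro n
  induction n with
  | zero => intro _ _ _ h; omega
  | succ m ih =>
      intro d hd0 hd99 _
      rw [Function.iterate_succ_apply]
      have hs : pvStep dir d = 0 := by
        unfold pvStep; dsimp only
        have h1 : ¬ d + dir < 0 := by omega
        have h2 : d + dir > 99 := by omega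
        simp [h1, h2]
      rw [hs]
      rcases Nat.eq_zero_or_pos m with hm | hm
      · simp [hm]
      · exact ih 0 (by omega) (by omega) hm

lemma iter_zero_dir (n : Nat) (d : Int) (hd0 : 0 ≤ d) (hd99 : d ≤ 99) :
    (pvStep 0)^[n] d = d := by
  apply Function.iterate_fixed
  unfold pvStep; dsimp only
  split_ifs <;> omega

-- the closed form for a positive direction 1 ≤ dir ≤ 99, starting inside [0,99]
lemma iter_closed_pos (dir : Int) (hdir : 0 < dir) (hdir99 : dir ≤ 99)
    (n : Nat) (d : Int) (hd0 : 0 ≤ d) (hd99 : d ≤ 99) :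
    (pvStep dir)^[n] d =
      if (n : Int) ≤ (99 - d) / dir then d + (n : Int) * dir
      else (((n : Int) - (99 - d) / dir - 1) % ((99:Int) / dir + 1)) * dir := by
  set t : Int := (99 - d) / dir with ht
  have hmod := Int.emod_nonneg (99 - d) (by omega : dir ≠ 0)
  have hmodlt := Int.emod_lt_of_pos (99 - d) hdir
  have hde := Int.mul_ediv_add_emod (99 - d) dir
  have ht0 : 0 ≤ t := Int.ediv_nonneg (by omega) (by omega)
  by_cases hle : (n : Int) ≤ t
  · rw [if_pos hle]
    exact iter_linear dir hdir n d hd0 (by nlinarith [hde])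
  · rw [if_neg hle]
    have hsplit : n = ((n : Int) - t - 1).toNat + (t.toNat + 1) := by omega
    rw [hsplit, Function.iterate_add_apply, iter_hits_zero dir hdir hdir99 d hd0 hd99,
        iter_cycle dir hdir hdir99]
    congr 2
    omega

-- A's loop for a nonpositive counter, stated on rotate_dial's shape, is immediate;
-- the main theorem assembles the cases.
theorem rotate_dial_spec : Claim_equal_rotate_dial := by
  intro rotations dial dir _
  unfold Spec_rotate_dial rotate_dial rotate_dial_alt
  by_cases hr : rotations ≤ 0
  · rw [if_pos hr, rotateGoA_nonpos _ _ _ hr]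
  · rw [if_neg hr]
    -- peel the first iteration of A's loop
    have hpos : rotations > 0 := by omega
    have hfirst : rotateGoA rotations dial dir
        = rotateGoA (rotations - 1) (pvStep dir dial) dir := by
      rw [rotateGoA]; simp only [hpos, dif_pos]; rfl
    set d : Int := pvStep dir dial with hd
    have hdr := pvStep_range dir dial
    set n : Int := rotations - 1 with hn
    have hn0 : 0 ≤ n := by omega
    have hnn : ((n.toNat : Nat) : Int) = n := Int.toNat_of_nonneg hn0
    have hiter : rotateGoA rotations dial dir = (pvStep dir)^[n.toNat] d := by
      rw [hfirst]
      have h := rotateGoA_eq_iter n.toNat d dir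
      rw [hnn] at h
      exact h
    dsimp only
    have hdB : (if (if dial + dir < 0 then 99 else dial + dir) > 99 then 0
        else if dial + dir < 0 then 99 else dial + dir) = d := rfl
    rw [hdB, hiter]
    by_cases hbase : n = 0 ∨ dir = 0
    · rw [if_pos hbase]
      rcases hbase with h0 | h0
      · simp [h0]
      · subst h0; exact iter_zero_dir n.toNat d hdr.1 hdr.2
    · rw [if_neg hbase]
      rw [not_or] at hbase
      obtain ⟨hne, hdirne⟩ := hbase
      have hn1 : 1 ≤ n.toNat := by omega
      by_cases hbig : dir ≥ 100
      · rw [if_pos hbig]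
        exact iter_big_pos dir hbig n.toNat d hdr.1 hdr.2 hn1
      · rw [if_neg hbig]
        by_cases hbigneg : dir ≤ -100
        · rw [if_pos hbigneg]
          rw [iter_conj dir (by omega) n.toNat d hdr.1 hdr.2]
          rw [iter_big_pos (-dir) (by omega) n.toNat (99 - d) (by omega) (by omega) hn1]
          norm_num
        · rw [if_neg hbigneg]
          by_cases hposd : dir > 0
          · rw [if_pos hposd]
            have hcf := iter_closed_pos dir hposd (by omega) n.toNat d hdr.1 hdr.2
            rw [hcf, hnn]
            rw [PySem.Int.floordiv_eq_ediv_of_pos hposd, PySem.Int.floordiv_eq_ediv_of_pos hposd]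
            by_cases hle : n ≤ (99 - d) / dir
            · rw [if_pos hle, if_pos hle]
            · rw [if_neg hle, if_neg hle]
              rw [PySem.Int.mod_eq_emod_of_pos]
              have : (0:Int) ≤ 99 / dir := Int.ediv_nonneg (by omega) (by omega)
              omega
          · rw [if_neg hposd]
            have hdirneg : dir < 0 := by omega
            have hs : (0:Int) < -dir := by omega
            rw [iter_conj dir hdirneg n.toNat d hdr.1 hdr.2]
            have hcf := iter_closed_pos (-dir) hs (by omega) n.toNat (99 - d) (by omega) (by omega)
            rw [hcf, hnn]
            have h99d : (99 : Int) - (99 - d) = d := by ring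
            rw [h99d]
            rw [PySem.Int.floordiv_eq_ediv_of_pos hs, PySem.Int.floordiv_eq_ediv_of_pos hs]
            by_cases hle : n ≤ d / (-dir)
            · rw [if_pos hle, if_pos hle]; ring
            · rw [if_neg hle, if_neg hle]
              rw [PySem.Int.mod_eq_emod_of_pos]
              have : (0:Int) ≤ 99 / (-dir) := Int.ediv_nonneg (by omega) (by omega)
              omega
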